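-- pv_equiv track=rewrite | github.com/ralucaandreea04/Python_Bocanet_Raluca_Andreea | Laborator1/Lab1.py | problem_6
-- ===== SOURCE A (Python) =====
-- def problem_6(text):
--     number = ''
--     for character in text:
--         if character.isdigit():
--             number += character
--         elif number:
--             break
--     return number
-- ===== SOURCE B (Python) =====
-- def problem_6(text):
--     i = 0
--     while i < len(text) and not text[i].isdigit():
--         i += 1
--     j = i
--     while j < len(text) and text[j].isdigit():
--         j += 1
--     return text[i:j]
-- ===== Notes on version B (the rewrite author's own statement) =====
-- stated objective: alternative
-- what changed: Replaces the stateful accumulator loop with break by a two-phase index scan (skip leading non-digits, then advance past the digit run) returning a slice, with no accumulator or started-flag.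
import Mathlib
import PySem

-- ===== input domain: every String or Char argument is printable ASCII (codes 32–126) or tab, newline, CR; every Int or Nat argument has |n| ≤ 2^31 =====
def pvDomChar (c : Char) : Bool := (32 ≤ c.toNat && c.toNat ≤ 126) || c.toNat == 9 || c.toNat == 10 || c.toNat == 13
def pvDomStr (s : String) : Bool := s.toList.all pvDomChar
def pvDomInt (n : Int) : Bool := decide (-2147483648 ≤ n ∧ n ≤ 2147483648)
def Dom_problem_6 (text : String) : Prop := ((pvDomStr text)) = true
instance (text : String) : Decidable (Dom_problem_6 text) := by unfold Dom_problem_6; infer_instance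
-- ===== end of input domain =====

-- B replaces A's accumulator loop with break by a two-phase index scan returning a slice (alternative decomposition, same cost).


-- ===== PORT A =====
-- the for-loop with break: state is the accumulated string 'number'
def pvLoopA : List Char → List Char → List Char
  | [], number => number
  | c :: rest, number =>
    if PySem.Chars.isdigit c then pvLoopA rest (number ++ [c])
    else if number = [] then pvLoopA rest number
    else number

def problem_6 (text : String) : String := String.ofList (pvLoopA text.toList [])

-- ===== PORT B =====
-- first while loop: advance i past leading non-digits
def pvSkipB (cs : List Char) (i : Nat) : Nat :=
  if h : i < cs.length then
    if PySem.Chars.isdigit cs[i] then i else pvSkipB cs (i + 1)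
  else i
termination_by cs.length - i

-- second while loop: advance j past the digit run
def pvScanB (cs : List Char) (j : Nat) : Nat :=
  if h : j < cs.length then
    if PySem.Chars.isdigit cs[j] then pvScanB cs (j + 1) else j
  else j
termination_by cs.length - j

def problem_6_alt (text : String) : String :=
  let cs := text.toList
  let i := pvSkipB cs 0
  let j := pvScanB cs i
  String.ofList (PySem.List.slice cs (some (i : Int)) (some (j : Int)))

-- ===== PRECONDITION & SPEC =====
def Spec_problem_6 (text : String) (out : String) : Prop := out = problem_6_alt text
instance (text : String) (out : String) : Decidable (Spec_problem_6 text out) := by unfold Spec_problem_6; infer_instance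

-- ===== CLAIM (what is proved, stated in full; the proofs are below) =====
def Claim_equal_problem_6 : Prop := ∀ (text : String), Dom_problem_6 text → Spec_problem_6 text (problem_6 text)

-- ===== LEMMAS AND PROOFS =====

-- dropping the takeWhile-prefix is dropWhile
theorem drop_length_takeWhile (cs : List Char) (p : Char → Bool) :
    List.drop (List.takeWhile p cs).length cs = List.dropWhile p cs := by
  induction cs with
  | nil => simp
  | cons c rest ih => by_cases hp : p c <;> simp [hp, ih]

-- A's loop once the accumulator is nonempty: it appends the remaining digit run and stops
theorem pvLoopA_nonempty (cs acc : List Char) (h : acc ≠ []) :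
    pvLoopA cs acc = acc ++ cs.takeWhile PySem.Chars.isdigit := by
  induction cs generalizing acc with
  | nil => simp [pvLoopA]
  | cons c rest ih =>
    by_cases hd : PySem.Chars.isdigit c
    · simp [pvLoopA, hd, ih (acc ++ [c]) (by simp)]
    · simp [pvLoopA, hd, h]

-- A's loop from the empty accumulator: skip non-digits, then take the digit run
theorem pvLoopA_spec (cs : List Char) :
    pvLoopA cs [] = (cs.dropWhile (fun c => !PySem.Chars.isdigit c)).takeWhile PySem.Chars.isdigit := by
  induction cs with
  | nil => simp [pvLoopA]
  | cons c rest ih =>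
    by_cases hd : PySem.Chars.isdigit c
    · simp [pvLoopA, hd, pvLoopA_nonempty rest [c] (by simp)]
    · simpa [pvLoopA, hd, List.dropWhile_cons] using ih

-- B's first loop computes the length of the non-digit prefix after i
theorem pvSkipB_spec (cs : List Char) (i : Nat) :
    pvSkipB cs i = i + ((cs.drop i).takeWhile (fun c => !PySem.Chars.isdigit c)).length := by
  unfold pvSkipB
  split
  · next h =>
    have hdrop : cs.drop i = cs[i] :: cs.drop (i + 1) := List.drop_eq_getElem_cons h
    rw [hdrop, List.takeWhile_cons]
    by_cases hd : PySem.Chars.isdigit cs[i]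
    · simp [hd]
    · rw [pvSkipB_spec cs (i + 1)]
      simp [hd]
      omega
  · next h =>
    have : cs.drop i = [] := List.drop_eq_nil_of_le (by omega)
    simp [this]
termination_by cs.length - i

-- B's second loop computes the length of the digit run after j
theorem pvScanB_spec (cs : List Char) (j : Nat) :
    pvScanB cs j = j + ((cs.drop j).takeWhile PySem.Chars.isdigit).length := by
  unfold pvScanB
  split
  · next h =>
    have hdrop : cs.drop j = cs[j] :: cs.drop (j + 1) := List.drop_eq_getElem_cons h
    rw [hdrop, List.takeWhile_cons]
    by_cases hd : PySem.Chars.isdigit cs[j]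
    · rw [pvScanB_spec cs (j + 1)]
      simp [hd]
      omega
    · simp [hd]
  · next h =>
    have : cs.drop j = [] := List.drop_eq_nil_of_le (by omega)
    simp [this]
termination_by cs.length - j

-- ===== VERDICT (by name: the statement is the Claim_ definition above) =====
theorem problem_6_spec : Claim_equal_problem_6 := by
  intro text _
  unfold Spec_problem_6 problem_6 problem_6_alt
  show String.ofList (pvLoopA text.toList []) =
    String.ofList (PySem.List.slice text.toList (some ((pvSkipB text.toList 0 : Nat) : Int))
      (some ((pvScanB text.toList (pvSkipB text.toList 0) : Nat) : Int)))
  set cs := text.toList with hcs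
  rw [pvLoopA_spec]
  have hskip := pvSkipB_spec cs 0
  simp only [List.drop_zero, Nat.zero_add] at hskip
  rw [hskip, pvScanB_spec]
  rw [PySem.List.slice_natCast]
  rw [Nat.add_sub_cancel_left, drop_length_takeWhile]
  have hpre : (cs.dropWhile (fun c => !PySem.Chars.isdigit c)).takeWhile PySem.Chars.isdigit
      <+: cs.dropWhile (fun c => !PySem.Chars.isdigit c) := List.takeWhile_prefix _
  exact congrArg String.ofList (List.prefix_iff_eq_take.mp hpre)
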